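-- pv_equiv track=rewrite | github.com/RithvikBhonagiri3/PythonCodingChallenge | new_nation_n_states.py | get_max_pop_set
-- ===== SOURCE A (Python) =====
-- def get_max_pop_set(sets_of_states, state_population):
--     max_set = []
--     max_population = 0
--     for state_set in sets_of_states:
--         set_population = 0
--         for state in state_set:
--             set_population = set_population + state_population.get(state, 0)
--         if set_population > max_population:
--             max_population = set_population
--             max_set = state_set
--     return (max_set, max_population)
-- ===== SOURCE B (Python) =====
-- def get_max_pop_set(sets_of_states, state_population):
--     # Stage 1: table of (population, set) pairs. Stage 2: stable sort descending by
--     # population (stability makes the FIRST set win ties). Stage 3: the top entry is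
--     # the answer iff its population beats the 0 threshold.
--     table = [(sum(state_population.get(s, 0) for s in ss), ss) for ss in sets_of_states]
--     ranked = sorted(table, key=lambda t: -t[0])
--     if ranked and ranked[0][0] > 0:
--         return (ranked[0][1], ranked[0][0])
--     return ([], 0)
-- ===== Notes on version B (the rewrite author's own statement) =====
-- stated objective: alternative
-- what changed: Replaces A's running-max accumulator loop with a sort-then-pick strategy: build a (population, set) table, stable-sort it descending by population (stability gives first-tie-wins), and take the top entry if its population exceeds 0.
import Mathlib
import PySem

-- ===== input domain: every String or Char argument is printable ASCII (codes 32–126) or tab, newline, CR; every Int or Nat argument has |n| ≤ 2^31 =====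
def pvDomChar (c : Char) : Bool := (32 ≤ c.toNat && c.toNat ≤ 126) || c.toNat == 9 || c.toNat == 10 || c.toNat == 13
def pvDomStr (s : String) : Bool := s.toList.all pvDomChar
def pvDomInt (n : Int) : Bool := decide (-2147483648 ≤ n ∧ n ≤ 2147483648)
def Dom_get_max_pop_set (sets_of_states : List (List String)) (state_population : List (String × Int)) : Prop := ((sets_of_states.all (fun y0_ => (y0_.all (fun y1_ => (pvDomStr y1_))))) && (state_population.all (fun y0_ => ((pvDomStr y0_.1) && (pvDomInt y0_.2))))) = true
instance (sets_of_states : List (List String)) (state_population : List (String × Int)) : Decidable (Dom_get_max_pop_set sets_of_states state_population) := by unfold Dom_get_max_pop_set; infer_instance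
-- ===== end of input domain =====

-- B replaces A's running-max accumulator loop with sort-then-pick: build a
-- (population, set) table, stable-sort it descending by population, take the top
-- entry if its population exceeds 0 (alternative strategy, not claimed faster).

-- ===== PORT A =====
-- A's nested loops: inner loop sums state_population.get(state, 0), outer loop keeps
-- (max_set, max_population), updating only on a strictly greater sum.
def get_max_pop_set (sets_of_states : List (List String)) (state_population : List (String × Int)) : List String × Int :=
  let r := sets_of_states.foldl
    (fun acc state_set =>
      let set_population := state_set.foldl
        (fun s state => s + (PySem.Dict.mk state_population).getD state 0) 0
      if set_population > acc.2 then (state_set, set_population) else acc)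
    ([], 0)
  r

-- ===== PORT B =====
-- Source B: table of (sum, set) pairs; ranked = sorted(table, key=lambda t: -t[0])
-- (stable); return top entry if ranked and ranked[0][0] > 0, else ([], 0).
def get_max_pop_set_alt (sets_of_states : List (List String)) (state_population : List (String × Int)) : List String × Int :=
  let table := sets_of_states.map
    (fun ss => ((ss.map (fun s => (PySem.Dict.mk state_population).getD s 0)).sum, ss))
  let ranked := PySem.List.sorted table (fun t => -t.1) false
  match ranked with
  | [] => ([], 0)
  | t :: _ => if t.1 > 0 then (t.2, t.1) else ([], 0)

-- ===== PRECONDITION & SPEC =====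
def Spec_get_max_pop_set (sets_of_states : List (List String)) (state_population : List (String × Int)) (out : List String × Int) : Prop := out = get_max_pop_set_alt sets_of_states state_population
instance (sets_of_states : List (List String)) (state_population : List (String × Int)) (out : List String × Int) : Decidable (Spec_get_max_pop_set sets_of_states state_population out) := by unfold Spec_get_max_pop_set; infer_instance

-- ===== CLAIM (what is proved, stated in full; the proofs are below) =====
def Claim_equal_get_max_pop_set : Prop := ∀ (sets_of_states : List (List String)) (state_population : List (String × Int)), Dom_get_max_pop_set sets_of_states state_population → Spec_get_max_pop_set sets_of_states state_population (get_max_pop_set sets_of_states state_population)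

-- ===== LEMMAS AND PROOFS =====

-- The step both characterisations share: keep the incumbent unless the newcomer's
-- population is strictly greater (first-tie-wins running max on (pop, set) pairs).
def pvStep (m x : Int × List String) : Int × List String := if m.1 < x.1 then x else m

-- A's outer loop over `sets`, started at any accumulator (ms, mp), is the swapped
-- running max pvStep over B's (sum, set) table started at (mp, ms).
theorem pv_loop_eq (state_population : List (String × Int)) (sets : List (List String))
    (ms : List String) (mp : Int) :
    sets.foldl
      (fun acc state_set =>
        let set_population := state_set.foldl
          (fun s state => s + (PySem.Dict.mk state_population).getD state 0) 0
        if set_population > acc.2 then (state_set, set_population) else acc)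
      (ms, mp)
    = (fun t : Int × List String => (t.2, t.1))
        ((sets.map (fun ss => ((ss.map (fun s => (PySem.Dict.mk state_population).getD s 0)).sum, ss))).foldl
          pvStep (mp, ms)) := by
  induction sets generalizing ms mp with
  | nil => rfl
  | cons ss t ih =>
    simp only [List.map_cons, List.foldl_cons]
    have hsum : ss.foldl (fun s state => s + (PySem.Dict.mk state_population).getD state 0) 0
        = (ss.map (fun s => (PySem.Dict.mk state_population).getD s 0)).sum := by
      simp [List.sum_eq_foldl, List.foldl_map]
    simp only [hsum, gt_iff_lt, pvStep]
    split <;> exact ih _ _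

-- Inserting into a nonempty list only ever changes the head by one pvStep-style
-- comparison (head of insertBy before x (m :: t) is x when before x m, else m).
theorem pv_head_insertBy (before : Int × List String → Int × List String → Bool)
    (x m : Int × List String) (t : List (Int × List String)) :
    ∃ t', PySem.List.insertBy before x (m :: t)
      = (if before x m then x else m) :: t' := by
  unfold PySem.List.insertBy
  split <;> exact ⟨_, rfl⟩

-- Folding further insertions onto a nonempty accumulator keeps a head equal to the
-- pvStep running max of the inserted elements (tail unconstrained).
theorem pv_head_fold (l : List (Int × List String)) (m : Int × List String)
    (t : List (Int × List String)) :
    ∃ t', l.foldl (fun acc x => PySem.List.insertBy (fun p q => decide (-p.1 < -q.1)) x acc) (m :: t)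
      = (l.foldl pvStep m) :: t' := by
  induction l generalizing m t with
  | nil => exact ⟨t, rfl⟩
  | cons x xs ih =>
    simp only [List.foldl_cons]
    obtain ⟨u, hu⟩ := pv_head_insertBy (fun p q => decide (-p.1 < -q.1)) x m t
    rw [hu]
    have hstep : (if (decide (-x.1 < -m.1) : Bool) then x else m) = pvStep m x := by
      simp only [pvStep, decide_eq_true_eq]
      by_cases h : m.1 < x.1 <;> simp [h]
    rw [hstep]
    exact ih (pvStep m x) u

-- The head of B's stable descending sort of a nonempty table is A's running max.
theorem pv_head_sorted (a : Int × List String) (l : List (Int × List String)) :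
    ∃ t, PySem.List.sorted (a :: l) (fun t => -t.1) false = (l.foldl pvStep a) :: t := by
  rw [PySem.List.sorted_eq_foldl_insertBy]
  simp only [List.foldl_cons]
  have base : PySem.List.insertBy (fun p q => decide (-p.1 < -q.1)) a ([] : List (Int × List String)) = [a] := rfl
  rw [base]
  exact pv_head_fold l a []

-- Key if-algebra: folding pvStep from a sentinel s over a nonempty list equals the
-- sentinel-free running max, kept only if it strictly beats the sentinel.
theorem pv_fold_sentinel (l : List (Int × List String)) (a s : Int × List String) :
    (a :: l).foldl pvStep s
      = if s.1 < (l.foldl pvStep a).1 then l.foldl pvStep a else s := by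
  induction l generalizing a s with
  | nil => simp [pvStep]
  | cons b l' ih =>
    have h1 := ih b (pvStep s a)
    have h2 := ih b a
    simp only [List.foldl_cons] at h1 h2 ⊢
    rw [h1, h2]
    simp only [pvStep]
    split_ifs <;> first | rfl | omega

-- ===== VERDICT (by name: the statement is the Claim_ definition above) =====
theorem get_max_pop_set_spec : Claim_equal_get_max_pop_set := by
  intro sets pop _
  show get_max_pop_set sets pop = get_max_pop_set_alt sets pop
  simp only [get_max_pop_set, get_max_pop_set_alt]
  rw [pv_loop_eq]
  cases h : sets.map (fun ss => ((ss.map (fun s => (PySem.Dict.mk pop).getD s 0)).sum, ss)) with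
  | nil => simp [PySem.List.sorted]
  | cons a l =>
    obtain ⟨t, ht⟩ := pv_head_sorted a l
    rw [ht, pv_fold_sentinel]
    simp only [gt_iff_lt]
    split_ifs <;> rfl
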